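-- pv_equiv track=rewrite | github.com/lancelot291/algorithms-level-4 | 2025-01-24/65_divide-strings.py | solution_recursion
-- ===== SOURCE A (Python) =====
-- def solution_recursion(s):
--     if len(s) <= 1:
--         return 0
--     x = s[0]
--     x_same, x_diff = 0, 0
--     for i in range(1, len(s)):
--         if s[i] == x:
--             x_same += 1
--         else:
--             x_diff += 1
--
--         if x_same == x_diff:
--             return 1 + solution_recursion(s[i+1:])
--         elif i == len(s) - 1:
--             return 1
-- ===== SOURCE B (Python) =====
-- def solution_recursion(s):
--     count = 0
--     x = None
--     bal = 0
--     size = 0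
--     for c in s:
--         if x is None:
--             x = c
--             bal = 0
--             size = 1
--         else:
--             size += 1
--             bal += 1 if c == x else -1
--             if bal == 0:
--                 count += 1
--                 x = None
--                 bal = 0
--                 size = 0
--     if x is not None and size >= 2:
--         count += 1
--     return count
-- ===== Notes on version B (the rewrite author's own statement) =====
-- stated objective: faster
-- what changed: Replaces A's recursion with O(n) string slicing at every split by a single iterative left-to-right pass that keeps a running balance counter and chunk size, counting a split whenever the balance returns to zero.
import Mathlib
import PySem

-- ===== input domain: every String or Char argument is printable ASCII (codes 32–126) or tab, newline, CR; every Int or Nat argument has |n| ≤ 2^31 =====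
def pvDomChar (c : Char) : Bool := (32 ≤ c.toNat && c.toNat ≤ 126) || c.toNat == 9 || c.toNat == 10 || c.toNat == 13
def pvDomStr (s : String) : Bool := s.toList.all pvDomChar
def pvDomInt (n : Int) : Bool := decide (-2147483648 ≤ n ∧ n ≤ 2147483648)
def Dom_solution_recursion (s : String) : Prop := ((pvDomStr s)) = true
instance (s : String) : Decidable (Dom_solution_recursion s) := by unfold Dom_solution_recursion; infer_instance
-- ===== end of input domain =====

-- B replaces A's recursion-with-slicing by a single iterative pass over the characters
-- maintaining a balance counter; objective: faster (no repeated slicing / recursion).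

-- ===== PORT A =====
-- inner for-loop of A: scan the tail, updating the same/diff counters; returns
-- `some rest` when the counters become equal (A then returns 1 + recursion on rest),
-- `none` when the loop reaches the last index without balancing (A returns 1).
def findA (x : Char) : List Char → Int → Int → Option (List Char)
  | [], _, _ => none
  | c :: rest, same, diff =>
    let same := if c == x then same + 1 else same
    let diff := if c == x then diff else diff + 1
    if same == diff then some rest
    else findA x rest same diff

lemma findA_length : ∀ (t : List Char) (x : Char) (same diff : Int) (rest : List Char),
    findA x t same diff = some rest → rest.length < t.length := by
  intro t
  induction t with
  | nil => intro x same diff rest h; simp [findA] at h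
  | cons c r ih =>
    intro x same diff rest h
    rw [findA] at h
    by_cases hcond : ((if c == x then same + 1 else same) == (if c == x then diff else diff + 1)) = true
    · rw [if_pos hcond] at h
      cases h; simp
    · rw [if_neg hcond] at h
      exact Nat.lt_trans (ih _ _ _ _ h) (by simp)

def solution_recursionL (l : List Char) : Int :=
  if _h : l.length ≤ 1 then 0
  else
    match l with
    | [] => 0
    | x :: t =>
      match _hf : findA x t 0 0 with
      | some rest => 1 + solution_recursionL rest
      | none => 1
termination_by l.length
decreasing_by
  have := findA_length t x 0 0 rest _hf
  simp
  omega

def solution_recursion (s : String) : Int := solution_recursionL s.toList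

-- ===== PORT B =====
-- one step of B's for-loop; state = (count, current first char or none, balance, chunk size)
def stepB (st : Int × Option Char × Int × Int) (c : Char) : Int × Option Char × Int × Int :=
  match st with
  | (count, none, _bal, _size) => (count, some c, 0, 1)
  | (count, some x, bal, size) =>
    let size := size + 1
    let bal := bal + (if c == x then 1 else -1)
    if bal == 0 then (count + 1, none, 0, 0) else (count, some x, bal, size)

def solution_recursion_alt (s : String) : Int :=
  match s.toList.foldl stepB (0, none, 0, 0) with
  | (count, x, _bal, size) => if x.isSome ∧ 2 ≤ size then count + 1 else count

-- ===== PRECONDITION & SPEC =====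
def Spec_solution_recursion (s : String) (out : Int) : Prop := out = solution_recursion_alt s
instance (s : String) (out : Int) : Decidable (Spec_solution_recursion s out) := by unfold Spec_solution_recursion; infer_instance

-- ===== CLAIM (what is proved, stated in full; the proofs are below) =====
def Claim_equal_solution_recursion : Prop := ∀ (s : String), Dom_solution_recursion s → Spec_solution_recursion s (solution_recursion s)


-- ===== LEMMAS AND PROOFS =====

-- unfolding equations for A's port (the dependent match is awkward to rewrite directly)
lemma srl_some (x c : Char) (t rest : List Char) (hf : findA x (c :: t) 0 0 = some rest) :
    solution_recursionL (x :: c :: t) = 1 + solution_recursionL rest := by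
  rw [solution_recursionL]
  rw [dif_neg (by simp : ¬ ((x :: c :: t).length ≤ 1))]
  split
  · rename_i heq _
    exact absurd heq (by simp)
  · rename_i x' t' _ heq _
    injection heq with h1 h2
    subst h1
    subst h2
    split
    · rename_i r heq2
      rw [hf] at heq2
      injection heq2 with h3
      rw [h3]
    · rename_i heq2
      rw [hf] at heq2
      cases heq2

lemma srl_none (x c : Char) (t : List Char) (hf : findA x (c :: t) 0 0 = none) :
    solution_recursionL (x :: c :: t) = 1 := by
  rw [solution_recursionL]
  rw [dif_neg (by simp : ¬ ((x :: c :: t).length ≤ 1))]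
  split
  · rename_i heq _
    exact absurd heq (by simp)
  · rename_i x' t' _ heq _
    injection heq with h1 h2
    subst h1
    subst h2
    split
    · rename_i r heq2
      rw [hf] at heq2
      cases heq2
    · rfl

-- the count component of B's fold is additive in the initial count
lemma foldB_shift : ∀ (l : List Char) (c d : Int) (x : Option Char) (bal size : Int),
    List.foldl stepB (c + d, x, bal, size) l =
      ((List.foldl stepB (d, x, bal, size) l).1 + c,
       (List.foldl stepB (d, x, bal, size) l).2) := by
  intro l
  induction l with
  | nil => intro c d x bal size; simp; ring
  | cons ch r ih =>
    intro c d x bal size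
    match x with
    | none =>
      simpa [stepB] using ih c d (some ch) 0 1
    | some y =>
      by_cases hb : bal + (if ch = y then 1 else -1) = 0
      · have h1 : stepB (c + d, some y, bal, size) ch = (c + d + 1, none, 0, 0) := by
          simp [stepB, hb]
        have h2 : stepB (d, some y, bal, size) ch = (d + 1, none, 0, 0) := by
          simp [stepB, hb]
        simp only [List.foldl_cons, h1, h2]
        have he : c + d + 1 = c + (d + 1) := by ring
        rw [he]
        exact ih c (d + 1) none 0 0
      · have h1 : stepB (c + d, some y, bal, size) ch
            = (c + d, some y, bal + (if ch = y then 1 else -1), size + 1) := by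
          simp [stepB, hb]
        have h2 : stepB (d, some y, bal, size) ch
            = (d, some y, bal + (if ch = y then 1 else -1), size + 1) := by
          simp [stepB, hb]
        simp only [List.foldl_cons, h1, h2]
        exact ih c d (some y) (bal + (if ch = y then 1 else -1)) (size + 1)

-- relates A's inner scan (findA) to B's fold within one chunk
lemma chunk_lemma : ∀ (t : List Char) (x : Char) (same diff count size : Int),
    (∀ rest, findA x t same diff = some rest →
       List.foldl stepB (count, some x, same - diff, size) t =
         List.foldl stepB (count + 1, none, 0, 0) rest)
    ∧ (findA x t same diff = none →
       ∃ b, List.foldl stepB (count, some x, same - diff, size) t =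
              (count, some x, b, size + t.length)) := by
  intro t
  induction t with
  | nil =>
    intro x same diff count size
    constructor
    · intro rest h; simp [findA] at h
    · intro _; exact ⟨same - diff, by simp⟩
  | cons c r ih =>
    intro x same diff count size
    by_cases hc : c = x
    · by_cases he : same + 1 = diff
      · -- balance closes here
        have hb : same - diff + 1 = 0 := by omega
        have hstep : stepB (count, some x, same - diff, size) c = (count + 1, none, 0, 0) := by
          simp [stepB, hc, hb]
        constructor
        · intro rest h
          rw [findA] at h
          rw [if_pos (by simp [hc, he])] at h
          cases h
          simp only [List.foldl_cons, hstep]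
        · intro h
          rw [findA] at h
          rw [if_pos (by simp [hc, he])] at h
          cases h
      · have hb : ¬ (same - diff + 1 = 0) := by omega
        have hstep : stepB (count, some x, same - diff, size) c
            = (count, some x, (same + 1) - diff, size + 1) := by
          simp [stepB, hc, hb]
          omega
        have hrec : ∀ o, findA x (c :: r) same diff = o → findA x r (same + 1) diff = o := by
          intro o h
          rw [findA] at h
          rw [if_neg (by simp [hc, he])] at h
          simpa [hc] using h
        constructor
        · intro rest h
          simp only [List.foldl_cons, hstep]
          exact (ih x (same + 1) diff count (size + 1)).1 rest (hrec _ h)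
        · intro h
          obtain ⟨b, hb2⟩ := (ih x (same + 1) diff count (size + 1)).2 (hrec _ h)
          refine ⟨b, ?_⟩
          simp only [List.foldl_cons, hstep, hb2, List.length_cons, Prod.mk.injEq]
          refine ⟨trivial, trivial, trivial, ?_⟩
          push_cast
          ring
    · by_cases he : same = diff + 1
      · have hb : same - diff + -1 = 0 := by omega
        have hstep : stepB (count, some x, same - diff, size) c = (count + 1, none, 0, 0) := by
          simp [stepB, hc, hb]
        constructor
        · intro rest h
          rw [findA] at h
          rw [if_pos (by simp [hc, he])] at h
          cases h
          simp only [List.foldl_cons, hstep]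
        · intro h
          rw [findA] at h
          rw [if_pos (by simp [hc, he])] at h
          cases h
      · have hb : ¬ (same - diff + -1 = 0) := by omega
        have hstep : stepB (count, some x, same - diff, size) c
            = (count, some x, same - (diff + 1), size + 1) := by
          simp [stepB, hc, hb]
          omega
        have hrec : ∀ o, findA x (c :: r) same diff = o → findA x r same (diff + 1) = o := by
          intro o h
          rw [findA] at h
          rw [if_neg (by simp [hc, he])] at h
          simpa [hc] using h
        constructor
        · intro rest h
          simp only [List.foldl_cons, hstep]
          exact (ih x same (diff + 1) count (size + 1)).1 rest (hrec _ h)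
        · intro h
          obtain ⟨b, hb2⟩ := (ih x same (diff + 1) count (size + 1)).2 (hrec _ h)
          refine ⟨b, ?_⟩
          simp only [List.foldl_cons, hstep, hb2, List.length_cons, Prod.mk.injEq]
          refine ⟨trivial, trivial, trivial, ?_⟩
          push_cast
          ring

-- B's whole-string value on lists (definitional restatement of solution_recursion_alt)
def runB (l : List Char) : Int :=
  match l.foldl stepB (0, none, 0, 0) with
  | (count, x, _bal, size) => if x.isSome ∧ 2 ≤ size then count + 1 else count

lemma main_lemma : ∀ (n : Nat) (l : List Char), l.length ≤ n →
    solution_recursionL l = runB l := by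
  intro n
  induction n with
  | zero =>
    intro l hl
    have : l = [] := List.length_eq_zero_iff.mp (Nat.le_zero.mp hl)
    subst this
    simp [solution_recursionL, runB]
  | succ n ih =>
    intro l hl
    match l with
    | [] => simp [solution_recursionL, runB]
    | [a] => simp [solution_recursionL, runB, stepB]
    | x :: c :: t =>
      have hstart : List.foldl stepB (0, none, 0, 0) (x :: c :: t)
          = List.foldl stepB (0, some x, 0, 1) (c :: t) := by
        simp [stepB]
      cases hf : findA x (c :: t) 0 0 with
      | some rest =>
        have hch := (chunk_lemma (c :: t) x 0 0 0 1).1 rest hf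
        rw [show (0 : Int) - 0 = 0 by norm_num] at hch
        have hrest : rest.length ≤ n := by
          have h1 := findA_length (c :: t) x 0 0 rest hf
          simp at hl h1
          omega
        have hIH := ih rest hrest
        rw [srl_some x c t rest hf, hIH]
        simp only [runB, hstart, hch]
        rw [show (0 : Int) + 1 = 1 + 0 by ring, foldB_shift rest 1 0 none 0 0]
        rcases hr : List.foldl stepB ((0 : Int), (none : Option Char), (0 : Int), (0 : Int)) rest
          with ⟨cnt, xx, bb, sz⟩
        by_cases hcond : xx.isSome = true ∧ 2 ≤ sz
        · rw [if_pos hcond, if_pos hcond]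
          omega
        · rw [if_neg hcond, if_neg hcond]
          omega
      | none =>
        obtain ⟨b, hch⟩ := (chunk_lemma (c :: t) x 0 0 0 1).2 hf
        rw [show (0 : Int) - 0 = 0 by norm_num] at hch
        rw [srl_none x c t hf]
        simp only [runB, hstart, hch]
        have hsz : (2 : Int) ≤ 1 + ((c :: t).length : Int) := by
          simp only [List.length_cons]
          push_cast
          omega
        rw [if_pos ⟨rfl, hsz⟩]
        norm_num

-- ===== VERDICT (by name: the statement is the Claim_ definition above) =====
theorem solution_recursion_spec : Claim_equal_solution_recursion := by
  intro s _
  unfold Spec_solution_recursion solution_recursion solution_recursion_alt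
  rw [main_lemma s.toList.length s.toList (le_refl _)]
  rfl
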